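-- pv_equiv track=rewrite | github.com/Jakeagle/Cyberstar-Analog-Signal-Simulator | SCME/SViz/visualizer_bridge.py | _run_lengths
-- ===== SOURCE A (Python) =====
-- from typing import Sequence
--
-- _ZERO_THRESH    = 200
--
-- def _run_lengths(samples: Sequence[int]) -> list[tuple[int, int]]:
--     runs = []
--     i = 0
--     n = len(samples)
--     while i < n:
--         s = samples[i]
--         if abs(s) < _ZERO_THRESH:
--             i += 1
--             continue
--         positive = s > 0
--         start = i
--         while i < n and ((samples[i] > 0) == positive) and abs(samples[i]) >= _ZERO_THRESH:
--             i += 1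
--         runs.append((start, i - start))
--     return runs
-- ===== SOURCE B (Python) =====
-- _ZERO_THRESH = 200
--
-- def _run_lengths(samples):
--     runs = []
--     in_run = False
--     run_start = 0
--     run_pos = False
--     i = 0
--     for s in samples:
--         active = abs(s) >= _ZERO_THRESH
--         pos = s > 0
--         if in_run and (not active or pos != run_pos):
--             runs.append((run_start, i - run_start))
--             in_run = False
--         if active and not in_run:
--             in_run = True
--             run_start = i
--             run_pos = pos
--         i += 1
--     if in_run:
--         runs.append((run_start, len(samples) - run_start))
--     return runs
-- ===== Notes on version B (the rewrite author's own statement) =====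
-- stated objective: simpler
-- what changed: Replaced A's nested outer-skip/inner-extend while loops with a single flat for-loop that maintains run state (in_run, run_start, run_pos) and flushes the open run at the end.
import Mathlib
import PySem

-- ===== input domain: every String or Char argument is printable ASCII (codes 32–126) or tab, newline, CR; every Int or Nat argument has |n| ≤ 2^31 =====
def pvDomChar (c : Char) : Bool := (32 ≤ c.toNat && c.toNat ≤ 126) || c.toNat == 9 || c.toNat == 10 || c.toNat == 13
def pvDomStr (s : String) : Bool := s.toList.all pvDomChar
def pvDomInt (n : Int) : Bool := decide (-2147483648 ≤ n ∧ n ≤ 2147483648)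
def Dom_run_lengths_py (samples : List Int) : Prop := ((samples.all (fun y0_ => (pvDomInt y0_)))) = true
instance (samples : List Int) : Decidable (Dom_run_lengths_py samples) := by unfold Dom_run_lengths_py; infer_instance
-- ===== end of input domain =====

-- B replaces A's nested outer-skip/inner-extend while loops with one flat pass keeping run state (in_run, run_start, run_pos) and a final flush; objective: simpler.


-- ===== PORT A =====
-- Port of A's inner while loop: starting at the list of samples after position i,
-- counts how many consecutive samples keep the run's sign and stay above the
-- threshold, and returns (count, remaining samples).
def aInner (positive : Bool) : List Int → Int × List Int
  | [] => (0, [])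
  | t :: rest =>
    if (decide (0 < t)) = positive ∧ 200 ≤ |t| then
      let p := aInner positive rest
      (p.1 + 1, p.2)
    else (0, t :: rest)

theorem aInner_len_le (positive : Bool) : ∀ (l : List Int), (aInner positive l).2.length ≤ l.length := by
  intro l
  induction l with
  | nil => simp [aInner]
  | cons t rest ih =>
    simp only [aInner]
    split
    · simpa using Nat.le_succ_of_le ih
    · simp

-- Port of A's outer while loop over the suffix of samples starting at index i.
def aGo : List Int → Int → List (Int × Int)
  | [], _ => []
  | s :: rest, i =>
    if |s| < 200 then aGo rest (i + 1)
    else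
      let positive := decide (0 < s)
      let p := aInner positive rest
      (i, p.1 + 1) :: aGo p.2 (i + p.1 + 1)
termination_by l _ => l.length
decreasing_by
  · simp
  · exact Nat.lt_succ_of_le (aInner_len_le (decide (0 < s)) rest)

def run_lengths_py (samples : List Int) : List (Int × Int) := aGo samples 0

-- ===== PORT B =====
-- Loop state of B's single flat pass: (runs, in_run, run_start, run_pos, i);
-- the enumerate index i is carried in the fold state.
structure BSt where
  runs : List (Int × Int)
  inRun : Bool
  start : Int
  pos : Bool
  i : Int
deriving Repr, DecidableEq

def bStep (st : BSt) (s : Int) : BSt :=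
  let active := decide (200 ≤ |s|)
  let pos := decide (0 < s)
  let st1 : BSt :=
    if st.inRun && (!active || pos != st.pos) then
      { st with runs := st.runs ++ [(st.start, st.i - st.start)], inRun := false }
    else st
  let st2 : BSt :=
    if active && !st1.inRun then { st1 with inRun := true, start := st.i, pos := pos }
    else st1
  { st2 with i := st.i + 1 }

def run_lengths_py_alt (samples : List Int) : List (Int × Int) :=
  let st := samples.foldl bStep ⟨[], false, 0, false, 0⟩
  if st.inRun then st.runs ++ [(st.start, (samples.length : Int) - st.start)] else st.runs

-- ===== PRECONDITION & SPEC =====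
def Spec_run_lengths_py (samples : List Int) (out : List (Int × Int)) : Prop := out = run_lengths_py_alt samples
instance (samples : List Int) (out : List (Int × Int)) : Decidable (Spec_run_lengths_py samples out) := by unfold Spec_run_lengths_py; infer_instance

-- ===== CLAIM (what is proved, stated in full; the proofs are below) =====
def Claim_equal_run_lengths_py : Prop := ∀ (samples : List Int), Dom_run_lengths_py samples → Spec_run_lengths_py samples (run_lengths_py samples)

-- ===== LEMMAS AND PROOFS =====

-- "flush" of B's final state, with the current index playing the role of n.
def bFlush (st : BSt) : List (Int × Int) :=
  if st.inRun then st.runs ++ [(st.start, st.i - st.start)] else st.runs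

theorem foldl_bStep_i (l : List Int) : ∀ (st : BSt), (l.foldl bStep st).i = st.i + l.length := by
  induction l with
  | nil => intro st; simp
  | cons s rest ih =>
    intro st
    rw [List.foldl_cons, ih]
    have h : (bStep st s).i = st.i + 1 := rfl
    rw [h]
    simp only [List.length_cons]
    push_cast
    omega

theorem aGo_nil (i : Int) : aGo [] i = [] := by rw [aGo]

theorem aGo_cons (s : Int) (rest : List Int) (i : Int) :
    aGo (s :: rest) i =
      if |s| < 200 then aGo rest (i + 1)
      else (i, (aInner (decide (0 < s)) rest).1 + 1) ::
        aGo (aInner (decide (0 < s)) rest).2 (i + (aInner (decide (0 < s)) rest).1 + 1) := by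
  rw [aGo]

-- Mutual simulation: B's fold from a not-in-run state produces A's outer loop,
-- and from an in-run state produces the open run extended by A's inner loop.
theorem bSim : ∀ (l : List Int),
    (∀ (runs : List (Int × Int)) (rs : Int) (rp : Bool) (i : Int),
      bFlush (l.foldl bStep ⟨runs, false, rs, rp, i⟩) = runs ++ aGo l i) ∧
    (∀ (runs : List (Int × Int)) (start : Int) (pos : Bool) (i : Int),
      bFlush (l.foldl bStep ⟨runs, true, start, pos, i⟩) =
        runs ++ (start, i + (aInner pos l).1 - start) :: aGo (aInner pos l).2 (i + (aInner pos l).1)) := by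
  intro l
  induction l with
  | nil =>
    constructor
    · intro runs rs rp i; simp [bFlush, aGo_nil]
    · intro runs start pos i; simp [bFlush, aInner, aGo_nil]
  | cons s rest ih =>
    obtain ⟨ihOut, ihIn⟩ := ih
    constructor
    · intro runs rs rp i
      by_cases hact : 200 ≤ |s|
      · -- active: open a run at i
        have hstep : bStep ⟨runs, false, rs, rp, i⟩ s = ⟨runs, true, i, decide (0 < s), i + 1⟩ := by
          simp [bStep, hact]
        rw [List.foldl_cons, hstep, ihIn, aGo_cons]
        rw [if_neg (not_lt.mpr hact)]
        have h1 : i + 1 + (aInner (decide (0 < s)) rest).1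
            = i + (aInner (decide (0 < s)) rest).1 + 1 := by ring
        rw [h1]
        have h2 : i + (aInner (decide (0 < s)) rest).1 + 1 - i
            = (aInner (decide (0 < s)) rest).1 + 1 := by ring
        rw [h2]
      · -- inactive: skip
        have hstep : bStep ⟨runs, false, rs, rp, i⟩ s = ⟨runs, false, rs, rp, i + 1⟩ := by
          simp [bStep, hact]
        rw [List.foldl_cons, hstep, ihOut, aGo_cons, if_pos (not_le.mp hact)]
    · intro runs start pos i
      by_cases hact : 200 ≤ |s|
      · by_cases hpos : (decide (0 < s)) = pos
        · -- same sign, still active: run continues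
          have hstep : bStep ⟨runs, true, start, pos, i⟩ s = ⟨runs, true, start, pos, i + 1⟩ := by
            simp [bStep, hact, hpos]
          have hinner : aInner pos (s :: rest) = ((aInner pos rest).1 + 1, (aInner pos rest).2) := by
            simp [aInner, hpos, hact]
          rw [List.foldl_cons, hstep, ihIn, hinner]
          have h1 : i + 1 + (aInner pos rest).1 = i + ((aInner pos rest).1 + 1) := by ring
          rw [h1]
        · -- sign flip: close the run, immediately open a new one
          have hstep : bStep ⟨runs, true, start, pos, i⟩ s =
              ⟨runs ++ [(start, i - start)], true, i, decide (0 < s), i + 1⟩ := by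
            simp [bStep, hact, hpos]
          have hinner : aInner pos (s :: rest) = (0, s :: rest) := by
            simp [aInner, hpos, hact]
          rw [List.foldl_cons, hstep, ihIn, hinner, aGo_cons, if_neg (not_lt.mpr hact)]
          have h1 : i + 1 + (aInner (decide (0 < s)) rest).1
              = i + (aInner (decide (0 < s)) rest).1 + 1 := by ring
          rw [h1]
          have h2 : i + (aInner (decide (0 < s)) rest).1 + 1 - i
              = (aInner (decide (0 < s)) rest).1 + 1 := by ring
          rw [h2]
          simp
      · -- below threshold: close the run, back to scanning
        have hstep : bStep ⟨runs, true, start, pos, i⟩ s =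
            ⟨runs ++ [(start, i - start)], false, start, pos, i + 1⟩ := by
          simp [bStep, hact]
        have hinner : aInner pos (s :: rest) = (0, s :: rest) := by
          simp [aInner, hact]
        rw [List.foldl_cons, hstep, ihOut, hinner, aGo_cons, if_pos (not_le.mp hact)]
        simp

-- ===== VERDICT (by name: the statement is the Claim_ definition above) =====
theorem run_lengths_py_spec : Claim_equal_run_lengths_py := by
  intro samples _
  unfold Spec_run_lengths_py run_lengths_py run_lengths_py_alt
  have h := (bSim samples).1 [] 0 false 0
  have hi := foldl_bStep_i samples ⟨[], false, 0, false, 0⟩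
  simp only [bFlush] at h
  simp only [List.nil_append] at h
  rw [← h]
  split <;> simp_all
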